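-- pv_equiv track=rewrite | github.com/TottiPuc/python_applications | Agent_Wumpus/movimiento.py | camino_rotacion
-- ===== SOURCE A (Python) =====
-- DELTA = (0, -1), (1, 0), (0, 1), (-1, 0)
--
-- def vecinos(posicion, size=(4, 4)):
--
--   """Retorna un generador para los cuadros vecinos."""
--
--   x, y = posicion
--   ancho, alto = size
--
--   #  cuadro de encima
--   if y - 1 >= 0:
--     yield x, y - 1
--
--   # cuadro de la derecha
--   if x + 1 < ancho:
--     yield x + 1, y
--
--   # cuadro de abajo
--   if y + 1 < alto:
--     yield x, y + 1
--
--   # cuadro de la izquierda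
--   if x - 1 >= 0:
--     yield x - 1, y
--
-- def rotacion(source, direccion, destino):
--
--   """Obtiene el numero de rotaciones necesaria para tener el cuadro de destino al frente."""
--
--   assert source in vecinos(destino)
--
--   # Calcula la diferencia entre los cuadros
--   diff = tuple([a - b for a, b in zip(destino, source)])
--   rot = DELTA.index(diff) - direccion
--   rot = rot if rot != 3 else -1
--
--   # Retorna el numeor minimo de rotaciones  (sentido hor치rio vs sentido anti-hor치rio)
--   return rot
--
-- def camino_rotacion(camino, direccion):
--
--   """Obtenemos una lista de rotaciones que el agente debe ejecutar para seguir el camino."""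
--
--   # Verifica la presencia de un camino valido
--   assert camino is not None
--   rotaciones = []
--
--   # Sigue el camino y calcula los pasos neces치rios para girar y despues avanzar
--   # hasta alzanzar la ultima posicion del camino
--   i = 0
--   while i < len(camino) - 1:
--     rot = rotacion(camino[i], direccion, camino[i + 1])
--     rotaciones.append(rot)
--     direccion = (direccion + rot) % len(DELTA)
--     i += 1
--   return tuple(rotaciones)
-- ===== SOURCE B (Python) =====
-- DELTA = (0, -1), (1, 0), (0, 1), (-1, 0)
--
-- def vecinos(posicion, size=(4, 4)):
--   """Retorna un generador para los cuadros vecinos."""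
--   x, y = posicion
--   ancho, alto = size
--   if y - 1 >= 0:
--     yield x, y - 1
--   if x + 1 < ancho:
--     yield x + 1, y
--   if y + 1 < alto:
--     yield x, y + 1
--   if x - 1 >= 0:
--     yield x - 1, y
--
-- def camino_rotacion(camino, direccion):
--   """Two-pass version: first the absolute heading of every step, then the rotations."""
--   assert camino is not None
--   # Pass 1: absolute heading of each consecutive move
--   headings = [direccion]
--   for source, destino in zip(camino, camino[1:]):
--     assert source in vecinos(destino)
--     diff = (destino[0] - source[0], destino[1] - source[1])
--     headings.append(DELTA.index(diff))
--   # Pass 2: rotation = difference of consecutive headings, with the 3 -> -1 remap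
--   result = []
--   for prev, cur in zip(headings, headings[1:]):
--     d = cur - prev
--     result.append(d if d != 3 else -1)
--   return tuple(result)
-- ===== Notes on version B (the rewrite author's own statement) =====
-- stated objective: alternative
-- what changed: A is a single stateful while-loop that recomputes the agent's direction with a mod-4 update each step; B is two independent passes: first map each consecutive pair to its absolute heading (DELTA index), then take differences of consecutive headings with the 3 -> -1 remap, with no direction state or mod arithmetic.
import Mathlib
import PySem

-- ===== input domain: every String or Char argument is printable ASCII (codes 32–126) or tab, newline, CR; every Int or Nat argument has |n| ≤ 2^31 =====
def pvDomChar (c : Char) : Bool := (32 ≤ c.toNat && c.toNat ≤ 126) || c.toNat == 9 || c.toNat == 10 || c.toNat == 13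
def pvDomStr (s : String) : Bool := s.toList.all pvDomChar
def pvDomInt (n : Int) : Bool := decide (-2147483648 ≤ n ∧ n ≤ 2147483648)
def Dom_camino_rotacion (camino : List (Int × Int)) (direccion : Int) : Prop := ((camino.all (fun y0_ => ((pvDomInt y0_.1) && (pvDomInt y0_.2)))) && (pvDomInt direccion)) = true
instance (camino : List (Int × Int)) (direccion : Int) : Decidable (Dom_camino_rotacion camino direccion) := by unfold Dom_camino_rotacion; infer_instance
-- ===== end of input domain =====

-- B replaces A's stateful direction-tracking loop by two passes (absolute headings, then
-- differences of consecutive headings); objective: alternative decomposition, same cost.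


-- ===== PORT A =====
def pyDELTA : List (Int × Int) := [(0, -1), (1, 0), (0, 1), (-1, 0)]

-- rotacion(source, direccion, destino); the assert and DELTA.index's ValueError are the
-- inputs Pre_camino_rotacion excludes, so .getD 0 is never reached under Pre_
def pyRotacion (source : Int × Int) (direccion : Int) (destino : Int × Int) : Int :=
  let diff : Int × Int := (destino.1 - source.1, destino.2 - source.2)
  let rot : Int := (((PySem.List.index? pyDELTA diff).getD 0 : Nat) : Int) - direccion
  if rot ≠ 3 then rot else -1

-- the while-loop: state = (current direccion), appends rot and updates direccion each step
def caminoLoopA : List (Int × Int) → Int → List Int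
  | p :: q :: rest, dir =>
      let rot := pyRotacion p dir q
      rot :: caminoLoopA (q :: rest) (PySem.Int.mod (dir + rot) 4)
  | _, _ => []

def camino_rotacion (camino : List (Int × Int)) (direccion : Int) : List Int :=
  caminoLoopA camino direccion

-- ===== PORT B =====
-- pass 1: absolute heading of one step (DELTA.index of the coordinate difference)
def altHeading (source destino : Int × Int) : Int :=
  (((PySem.List.index? pyDELTA (destino.1 - source.1, destino.2 - source.2)).getD 0 : Nat) : Int)

def camino_rotacion_alt (camino : List (Int × Int)) (direccion : Int) : List Int :=
  let headings := direccion :: (camino.zip camino.tail).map (fun sd => altHeading sd.1 sd.2)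
  (headings.zip headings.tail).map (fun pc => if pc.2 - pc.1 ≠ 3 then pc.2 - pc.1 else -1)

-- ===== PRECONDITION & SPEC =====
-- each consecutive source is an in-grid neighbour of its destination (the assert
-- 'source in vecinos(destino)' in rotacion); exactly the inputs where A returns normally
def adjOK (s d : Int × Int) : Bool :=
  decide ((s.1 = d.1 ∧ s.2 = d.2 - 1 ∧ 0 ≤ d.2 - 1) ∨
          (s.1 = d.1 + 1 ∧ s.2 = d.2 ∧ d.1 + 1 < 4) ∨
          (s.1 = d.1 ∧ s.2 = d.2 + 1 ∧ d.2 + 1 < 4) ∨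
          (s.1 = d.1 - 1 ∧ s.2 = d.2 ∧ 0 ≤ d.1 - 1))

-- Pre_ excludes exactly the paths on which A's assert (AssertionError) fires
def Pre_camino_rotacion (camino : List (Int × Int)) (direccion : Int) : Prop :=
  ((camino.zip camino.tail).all fun sd => adjOK sd.1 sd.2) = true
instance (camino : List (Int × Int)) (direccion : Int) : Decidable (Pre_camino_rotacion camino direccion) := by unfold Pre_camino_rotacion; infer_instance

def pvWitness_camino_rotacion : (List (Int × Int)) × Int := ([(0, 0), (0, 1), (1, 1)], 0)

def Spec_camino_rotacion (camino : List (Int × Int)) (direccion : Int) (out : List Int) : Prop := out = camino_rotacion_alt camino direccion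
instance (camino : List (Int × Int)) (direccion : Int) (out : List Int) : Decidable (Spec_camino_rotacion camino direccion out) := by unfold Spec_camino_rotacion; infer_instance

-- ===== CLAIM (what is proved, stated in full; the proofs are below) =====
def Claim_equal_camino_rotacion : Prop := ∀ (camino : List (Int × Int)) (direccion : Int), Dom_camino_rotacion camino direccion → Pre_camino_rotacion camino direccion → Spec_camino_rotacion camino direccion (camino_rotacion camino direccion)

-- ===== LEMMAS AND PROOFS =====

-- under adjOK the difference is an element of pyDELTA and its index is its heading 0..3
lemma heading_of_adjOK (s d : Int × Int) (h : adjOK s d = true) :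
    ∃ k : Nat, k < 4 ∧
      PySem.List.index? pyDELTA (d.1 - s.1, d.2 - s.2) = some k := by
  simp only [adjOK, decide_eq_true_eq] at h
  rcases h with ⟨h1, h2, _⟩ | ⟨h1, h2, _⟩ | ⟨h1, h2, _⟩ | ⟨h1, h2, _⟩
  · refine ⟨2, by norm_num, ?_⟩
    have hd : ((d.1 - s.1 : Int), (d.2 - s.2 : Int)) = ((0 : Int), (1 : Int)) := by
      rw [Prod.mk.injEq]; omega
    rw [hd]; decide
  · refine ⟨3, by norm_num, ?_⟩
    have hd : ((d.1 - s.1 : Int), (d.2 - s.2 : Int)) = ((-1 : Int), (0 : Int)) := by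
      rw [Prod.mk.injEq]; omega
    rw [hd]; decide
  · refine ⟨0, by norm_num, ?_⟩
    have hd : ((d.1 - s.1 : Int), (d.2 - s.2 : Int)) = ((0 : Int), (-1 : Int)) := by
      rw [Prod.mk.injEq]; omega
    rw [hd]; decide
  · refine ⟨1, by norm_num, ?_⟩
    have hd : ((d.1 - s.1 : Int), (d.2 - s.2 : Int)) = ((1 : Int), (0 : Int)) := by
      rw [Prod.mk.injEq]; omega
    rw [hd]; decide

-- B satisfies the same step recursion as A's loop, with the new direction = the heading
lemma alt_cons (p q : Int × Int) (rest : List (Int × Int)) (dir : Int) :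
    camino_rotacion_alt (p :: q :: rest) dir =
      (if altHeading p q - dir ≠ 3 then altHeading p q - dir else -1)
        :: camino_rotacion_alt (q :: rest) (altHeading p q) := by
  simp [camino_rotacion_alt]

lemma loopA_eq_alt (camino : List (Int × Int)) (dir : Int)
    (hpre : ((camino.zip camino.tail).all fun sd => adjOK sd.1 sd.2) = true) :
    caminoLoopA camino dir = camino_rotacion_alt camino dir := by
  induction camino generalizing dir with
  | nil => simp [caminoLoopA, camino_rotacion_alt]
  | cons p t ih =>
    cases t with
    | nil => simp [caminoLoopA, camino_rotacion_alt]
    | cons q rest =>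
      simp only [List.tail_cons, List.zip_cons_cons, List.all_cons, Bool.and_eq_true] at hpre
      obtain ⟨hadj, hrest⟩ := hpre
      obtain ⟨k, hk4, hidx⟩ := heading_of_adjOK p q hadj
      have hH : altHeading p q = (k : Int) := by
        simp only [altHeading, hidx, Option.getD_some]
      have hrot : pyRotacion p dir q =
          (if altHeading p q - dir ≠ 3 then altHeading p q - dir else -1) := by
        simp only [pyRotacion, altHeading, hidx, Option.getD_some]
      have hdir : PySem.Int.mod (dir + pyRotacion p dir q) 4 = altHeading p q := by
        rw [hrot, hH]
        by_cases h3 : (k : Int) - dir = 3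
        · have : dir + (if (k : Int) - dir ≠ 3 then (k : Int) - dir else -1) = (k : Int) - 4 := by
            simp [h3]; omega
          rw [this, PySem.Int.mod_eq_emod_of_pos (by norm_num)]
          omega
        · have : dir + (if (k : Int) - dir ≠ 3 then (k : Int) - dir else -1) = (k : Int) := by
            simp [h3]
          rw [this, PySem.Int.mod_eq_emod_of_pos (by norm_num)]
          omega
      rw [alt_cons]
      show pyRotacion p dir q :: caminoLoopA (q :: rest) (PySem.Int.mod (dir + pyRotacion p dir q) 4) = _
      rw [hdir, hrot, ih _ (by simpa using hrest)]

-- ===== VERDICT (by name: the statement is the Claim_ definition above) =====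
theorem camino_rotacion_spec : Claim_equal_camino_rotacion := by
  intro camino direccion _ hpre
  unfold Spec_camino_rotacion camino_rotacion
  exact loopA_eq_alt camino direccion hpre
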